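-- pv_equiv track=rewrite | github.com/33niteesh/basics | nsol.py | vre_con_matrics_str
-- ===== SOURCE A (Python) =====
-- def vre_con_matrics_str(mat):
--     b=[]
--     j=0
--     while(len(b)<len(mat)):
--         sum=''
--         for i in range(0,len(mat)):
--             sum=sum+str(mat[i][j])
--         b.append(sum)
--         j=j+1
--     return b
-- ===== SOURCE B (Python) =====
-- def vre_con_matrics_str(mat):
--     n = len(mat)
--     b = [''] * n
--     for row in mat:
--         b = [b[j] + str(row[j]) for j in range(n)]
--     return b
-- ===== Notes on version B (the rewrite author's own statement) =====
-- stated objective: alternative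
-- what changed: B makes a single row-major pass, rebuilding a list of n partial column strings per row, instead of A's column-major while-loop that completes one column string at a time with an inner scan over all rows.
import Mathlib
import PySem

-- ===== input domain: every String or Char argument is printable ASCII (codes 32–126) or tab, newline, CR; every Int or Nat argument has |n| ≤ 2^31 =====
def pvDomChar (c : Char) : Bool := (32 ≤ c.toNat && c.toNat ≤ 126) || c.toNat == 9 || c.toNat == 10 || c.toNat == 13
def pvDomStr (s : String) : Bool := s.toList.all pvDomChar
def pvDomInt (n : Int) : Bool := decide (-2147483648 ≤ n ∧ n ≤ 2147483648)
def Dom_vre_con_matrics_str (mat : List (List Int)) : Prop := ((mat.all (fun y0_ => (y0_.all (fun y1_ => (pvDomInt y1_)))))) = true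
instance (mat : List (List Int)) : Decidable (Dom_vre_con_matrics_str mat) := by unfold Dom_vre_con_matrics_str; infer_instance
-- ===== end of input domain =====

-- B traverses row-major in one pass, growing all column strings in parallel, instead of
-- A's column-major while-loop; same cost, different decomposition.

-- ===== PORT A =====
-- inner for-loop: sum = sum + str(mat[i][j]) over i in range(0, len(mat))
def pvColA (mat : List (List Int)) (j : Nat) : String :=
  (List.range mat.length).foldl
    (fun s i => s ++ PySem.Int.toStr (((mat.getD i []).getD j 0))) ""

-- while len(b) < len(mat): append column j, j += 1
def pvLoopA (mat : List (List Int)) (b : List String) (j : Nat) : List String :=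
  if b.length < mat.length then pvLoopA mat (b ++ [pvColA mat j]) (j + 1) else b
termination_by mat.length - b.length
decreasing_by simp_all; omega

def vre_con_matrics_str (mat : List (List Int)) : List String :=
  pvLoopA mat [] 0

-- ===== PORT B =====
def vre_con_matrics_str_alt (mat : List (List Int)) : List String :=
  let n := mat.length
  mat.foldl
    (fun b row => (List.range n).map (fun j => b.getD j "" ++ PySem.Int.toStr (row.getD j 0)))
    (List.replicate n "")

-- ===== PRECONDITION & SPEC =====
-- A raises IndexError (mat[i][j]) iff some row is shorter than len(mat); Pre_ excludes exactly those.
def Pre_vre_con_matrics_str (mat : List (List Int)) : Prop :=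
  ∀ row ∈ mat, mat.length ≤ row.length
instance (mat : List (List Int)) : Decidable (Pre_vre_con_matrics_str mat) := by
  unfold Pre_vre_con_matrics_str; infer_instance

def pvWitness_vre_con_matrics_str : List (List Int) := [[1, 2], [3, 4]]

def Spec_vre_con_matrics_str (mat : List (List Int)) (out : List String) : Prop := out = vre_con_matrics_str_alt mat
instance (mat : List (List Int)) (out : List String) : Decidable (Spec_vre_con_matrics_str mat out) := by unfold Spec_vre_con_matrics_str; infer_instance

-- ===== CLAIM (what is proved, stated in full; the proofs are below) =====
def Claim_equal_vre_con_matrics_str : Prop := ∀ (mat : List (List Int)), Dom_vre_con_matrics_str mat → Pre_vre_con_matrics_str mat → Spec_vre_con_matrics_str mat (vre_con_matrics_str mat)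

-- ===== LEMMAS AND PROOFS =====

-- pvColA as a fold over the rows themselves
theorem pvColA_eq_foldl (mat : List (List Int)) (j : Nat) :
    pvColA mat j = mat.foldl (fun s row => s ++ PySem.Int.toStr (row.getD j 0)) "" := by
  unfold pvColA
  generalize ("" : String) = s
  induction mat generalizing s with
  | nil => simp
  | cons r rs ih =>
      simp [List.range_succ_eq_map, List.foldl_map]
      exact ih _

-- A's while-loop unrolled: it appends columns j, j+1, … until length n
theorem pvLoopA_eq (mat : List (List Int)) (b : List String) (j : Nat) :
    pvLoopA mat b j = b ++ (List.range (mat.length - b.length)).map (fun k => pvColA mat (j + k)) := by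
  generalize h : mat.length - b.length = m
  induction m generalizing b j with
  | zero => rw [pvLoopA]; simp; omega
  | succ m ih =>
      rw [pvLoopA]
      have hlt : b.length < mat.length := by omega
      simp only [if_pos hlt]
      rw [ih (b ++ [pvColA mat j]) (j + 1) (by simp; omega)]
      simp [List.range_succ_eq_map, Function.comp_def]
      intro a _
      congr 1
      omega

theorem vre_con_matrics_str_eq (mat : List (List Int)) :
    vre_con_matrics_str mat
      = (List.range mat.length).map (fun j => mat.foldl (fun s row => s ++ PySem.Int.toStr (row.getD j 0)) "") := by
  unfold vre_con_matrics_str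
  rw [pvLoopA_eq]
  simp [pvColA_eq_foldl]

-- B's fold over rows, started from a range-map, stays a range-map of per-column folds
theorem alt_foldl_eq (n : Nat) (rows : List (List Int)) (g : Nat → String) :
    rows.foldl
      (fun b row => (List.range n).map (fun j => b.getD j "" ++ PySem.Int.toStr (row.getD j 0)))
      ((List.range n).map g)
    = (List.range n).map (fun j => rows.foldl (fun s row => s ++ PySem.Int.toStr (row.getD j 0)) (g j)) := by
  induction rows generalizing g with
  | nil => simp
  | cons r rs ih =>
      simp only [List.foldl_cons]
      have hstep : (List.range n).map (fun j => ((List.range n).map g).getD j "" ++ PySem.Int.toStr (r.getD j 0))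
          = (List.range n).map (fun j => g j ++ PySem.Int.toStr (r.getD j 0)) := by
        apply List.map_congr_left
        intro j hj
        simp only [List.mem_range] at hj
        rw [List.getD_eq_getElem _ _ (by simpa)]
        simp
      rw [hstep, ih]

theorem vre_con_matrics_str_alt_eq (mat : List (List Int)) :
    vre_con_matrics_str_alt mat
      = (List.range mat.length).map (fun j => mat.foldl (fun s row => s ++ PySem.Int.toStr (row.getD j 0)) "") := by
  unfold vre_con_matrics_str_alt
  have : (List.replicate mat.length ("" : String)) = (List.range mat.length).map (fun _ => "") := by
    simp [List.map_const']
  simp only [this]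
  exact alt_foldl_eq mat.length mat (fun _ => "")

-- ===== VERDICT (by name: the statement is the Claim_ definition above) =====
theorem vre_con_matrics_str_spec : Claim_equal_vre_con_matrics_str := by
  intro mat _ _
  unfold Spec_vre_con_matrics_str
  rw [vre_con_matrics_str_eq, vre_con_matrics_str_alt_eq]
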